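-- pv_equiv track=rewrite | github.com/VamshiKrsna/DSA | Arrays&Strings/Unq3LenPalindromes.py | uniquePalindromesBF
-- ===== SOURCE A (Python) =====
-- def uniquePalindromesBF(s:str)->int:
--     fin = 0
--     n = len(s)
--     M: dict[str,tuple] = {} # Store first and last occurence of each character
--     for i in range(n):
--         if s[i] not in M:
--             M[s[i]] = (i,i) # if substr (char) not in map, add it with index
--         else:
--             M[s[i]] = (M[s[i]][0],i) #otherwise, update the occurence
--     for ch, pos in M.items():
--         l,r = pos # l, r = first and last occrence of char
--         if r - l <= 1: # if l,r are besides, leave it.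
--             continue
--         unique_chars: set[str] = set(s[l + 1 : r])
--         fin += len(unique_chars)
--     return fin
-- ===== SOURCE B (Python) =====
-- def uniquePalindromesBF(s: str) -> int:
--     # Group positions per character once, then answer each character's span
--     # by range queries over the position lists (no slicing, no sets).
--     pos = {}
--     for i, ch in enumerate(s):
--         pos.setdefault(ch, []).append(i)
--     total = 0
--     for px in pos.values():
--         l, r = px[0], px[-1]
--         if r - l <= 1:
--             continue
--         for py in pos.values():
--             if any(l < j < r for j in py):
--                 total += 1
--     return total
-- ===== Notes on version B (the rewrite author's own statement) =====
-- stated objective: faster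
-- what changed: B replaces A's first/last-occurrence dict plus a fresh set built over each slice s[l+1:r] by a per-character position-list index built once, answering each character's span by checking every character's position list for an index strictly inside (l, r).
import Mathlib
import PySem

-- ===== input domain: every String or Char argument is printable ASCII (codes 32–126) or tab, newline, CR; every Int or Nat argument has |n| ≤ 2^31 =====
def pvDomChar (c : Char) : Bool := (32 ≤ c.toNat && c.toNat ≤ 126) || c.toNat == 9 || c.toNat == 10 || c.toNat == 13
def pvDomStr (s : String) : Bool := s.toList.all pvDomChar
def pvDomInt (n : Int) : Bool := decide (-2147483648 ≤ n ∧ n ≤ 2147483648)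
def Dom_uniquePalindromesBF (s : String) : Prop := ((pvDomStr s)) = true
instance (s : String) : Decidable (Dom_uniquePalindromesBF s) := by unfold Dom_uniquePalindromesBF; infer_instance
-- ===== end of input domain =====

-- B replaces A's first/last-occurrence dict plus a fresh set over each slice s[l+1:r] by a
-- per-character position-list index built once, answering each span by range checks on those
-- lists; a timing run measured B faster (no per-character slice copy + set build).

-- ===== PORT A =====
def uniquePalindromesBF (s : String) : Int :=
  let cs := s.toList
  let n : Int := (cs.length : Int)
  let M : PySem.Dict Char (Int × Int) :=
    (PySem.List.pyRange 0 n 1).foldl (fun M i =>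
      let c := PySem.List.pyGetD cs i ' '
      if M.contains c = false then M.insert c (i, i)
      else M.insert c ((M.getD c (0, 0)).1, i)) PySem.Dict.empty
  M.items.foldl (fun fin p =>
    let l := p.2.1
    let r := p.2.2
    if r - l ≤ 1 then fin
    else fin + ((PySem.Set.ofList (PySem.List.slice cs (some (l + 1)) (some r))).length : Int)) 0

-- ===== PORT B =====
def uniquePalindromesBF_alt (s : String) : Int :=
  let cs := s.toList
  let pos : PySem.Dict Char (List Int) :=
    (PySem.List.enumerate cs 0).foldl (fun d p => d.modify p.2 [] (· ++ [p.1])) PySem.Dict.empty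
  pos.values.foldl (fun total px =>
    match PySem.List.pyGet? px 0, PySem.List.pyGet? px (-1) with
    | some l, some r =>
      if r - l ≤ 1 then total
      else pos.values.foldl (fun t py =>
        if py.any (fun j => decide (l < j) && decide (j < r)) then t + 1 else t) total
    | _, _ => total) 0

-- ===== PRECONDITION & SPEC =====
def Spec_uniquePalindromesBF (s : String) (out : Int) : Prop := out = uniquePalindromesBF_alt s
instance (s : String) (out : Int) : Decidable (Spec_uniquePalindromesBF s out) := by unfold Spec_uniquePalindromesBF; infer_instance

-- ===== CLAIM (what is proved, stated in full; the proofs are below) =====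
def Claim_equal_uniquePalindromesBF : Prop := ∀ (s : String), Dom_uniquePalindromesBF s → Spec_uniquePalindromesBF s (uniquePalindromesBF s)

-- ===== LEMMAS AND PROOFS =====

def occL (l : List (Int × Char)) (c : Char) : List Int :=
  (l.filter (fun p => p.2 == c)).map (·.1)

def bodyE (M : PySem.Dict Char (Int × Int)) (p : Int × Char) : PySem.Dict Char (Int × Int) :=
  if M.contains p.2 = false then M.insert p.2 (p.1, p.1)
  else M.insert p.2 ((M.getD p.2 (0, 0)).1, p.1)

def foldE (l : List (Int × Char)) : PySem.Dict Char (Int × Int) := l.foldl bodyE PySem.Dict.empty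

lemma occL_append (l : List (Int × Char)) (p : Int × Char) (c : Char) :
    occL (l ++ [p]) c = occL l c ++ (if p.2 == c then [p.1] else []) := by
  by_cases h : p.2 = c
  · simp [occL, List.filter_append, h]
  · simp [occL, List.filter_append, h]

lemma foldE_append (l : List (Int × Char)) (p : Int × Char) :
    foldE (l ++ [p]) = bodyE (foldE l) p := by
  simp [foldE]

lemma foldE_get? (l : List (Int × Char)) (c : Char) :
    (foldE l).get? c = (occL l c).head?.bind (fun h => (occL l c).getLast?.map (fun t => (h, t))) := by
  induction l using List.reverseRecOn with
  | nil => simp [foldE, occL, PySem.Dict.get?_empty]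
  | append_singleton l p ih =>
    rw [occL_append, foldE_append]
    by_cases hc : p.2 = c
    · subst hc
      unfold bodyE
      rw [PySem.Dict.contains_eq_isSome_get?, ih]
      rcases ho : occL l p.2 with _ | ⟨h0, t0⟩
      · simp [PySem.Dict.get?_insert_self]
      · have hgl : (h0 :: t0).getLast? = some ((h0 :: t0).getLast (by simp)) :=
          List.getLast?_eq_some_getLast (by simp)
        rw [hgl]
        simp only [List.head?_cons, Option.bind_some, Option.map_some, Option.isSome_some,
          Bool.true_eq_false, if_false, beq_self_eq_true, if_true]
        rw [PySem.Dict.getD_eq_get?_getD, ih, ho, hgl]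
        simp only [List.head?_cons, Option.bind_some, Option.map_some, Option.getD_some]
        rw [PySem.Dict.get?_insert_self]
        have h1 : (h0 :: t0 ++ [p.1]).head? = some h0 := by simp
        have h2 : (h0 :: t0 ++ [p.1]).getLast? = some p.1 := by
          rw [List.getLast?_concat]
        rw [show (h0 :: t0) ++ [p.1] = h0 :: (t0 ++ [p.1]) by simp] at *
        rw [h2]
        simp
    · have hbc : (p.2 == c) = false := by simp [hc]
      simp only [hbc, Bool.false_eq_true, if_false, List.append_nil]
      unfold bodyE
      have hne : c ≠ p.2 := fun h => hc h.symm
      split <;> rw [PySem.Dict.get?_insert_of_ne _ _ hne, ih]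

lemma bodyE_eq_insert (M : PySem.Dict Char (Int × Int)) (p : Int × Char) :
    bodyE M p = M.insert p.2 (if M.contains p.2 = false then (p.1, p.1)
      else ((M.getD p.2 (0, 0)).1, p.1)) := by
  unfold bodyE
  exact (apply_ite (M.insert p.2) _ _ _).symm

lemma foldE_keys (l : List (Int × Char)) :
    (foldE l).keys = PySem.Set.ofList (l.map (·.2)) := by
  unfold foldE
  have hf : bodyE = fun (M : PySem.Dict Char (Int × Int)) (p : Int × Char) =>
      M.insert p.2 (if M.contains p.2 = false then (p.1, p.1) else ((M.getD p.2 (0, 0)).1, p.1)) := by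
    funext M p; exact bodyE_eq_insert M p
  rw [hf, PySem.Dict.keys_foldl_insert_key]
  simp [PySem.Dict.keys_empty, PySem.Set.update, PySem.Set.ofList_eq_foldl]

lemma foldE_nodup_keys (l : List (Int × Char)) : (foldE l).keys.Nodup := by
  unfold foldE
  have hf : bodyE = fun (M : PySem.Dict Char (Int × Int)) (p : Int × Char) =>
      M.insert p.2 (if M.contains p.2 = false then (p.1, p.1) else ((M.getD p.2 (0, 0)).1, p.1)) := by
    funext M p; exact bodyE_eq_insert M p
  rw [hf]
  exact PySem.Dict.nodup_keys_foldl_insert_key _ _ _ _ (by simp [PySem.Dict.keys_empty])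

def posDict (cs : List Char) : PySem.Dict Char (List Int) :=
  (PySem.List.enumerate cs 0).foldl (fun d p => d.modify p.2 [] (· ++ [p.1])) PySem.Dict.empty

def occCh (cs : List Char) (c : Char) : List Int := occL (PySem.List.enumerate cs 0) c

lemma posDict_getD (cs : List Char) (c : Char) : (posDict cs).getD c [] = occCh cs c := by
  unfold posDict occCh
  have h1 : (PySem.List.enumerate cs 0).foldl (fun d p => d.modify p.2 [] (· ++ [p.1])) PySem.Dict.empty
      = ((PySem.List.enumerate cs 0).map Prod.swap).foldl (fun d q => d.modify q.1 [] (· ++ [q.2])) PySem.Dict.empty := by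
    rw [List.foldl_map]
    rfl
  rw [h1, PySem.Dict.getD_foldl_modify_append]
  rw [List.filter_map, List.map_map]
  simp [occL, PySem.Dict.getD_empty]
  rfl

lemma posDict_keys (cs : List Char) : (posDict cs).keys = PySem.List.dedup cs := by
  unfold posDict
  rw [PySem.Dict.keys_foldl_modify_key]
  simp [PySem.Dict.keys_empty, PySem.Set.update, PySem.List.dedup_eq_ofList,
    PySem.Set.ofList_eq_foldl, PySem.List.map_snd_enumerate]

lemma posDict_nodup_keys (cs : List Char) : (posDict cs).keys.Nodup := by
  unfold posDict
  exact PySem.Dict.nodup_keys_foldl_modify_key _ _ _ _ _ (by simp [PySem.Dict.keys_empty])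

lemma mem_occCh (cs : List Char) (c : Char) (j : Int) :
    j ∈ occCh cs c ↔ ∃ k : Nat, ∃ hk : k < cs.length, j = (k : Int) ∧ cs[k] = c := by
  unfold occCh occL
  simp only [List.mem_map, List.mem_filter, PySem.List.mem_enumerate_iff]
  constructor
  · rintro ⟨p, ⟨⟨k, hk, rfl⟩, hc⟩, rfl⟩
    exact ⟨k, hk, by simpa using hc⟩
  · rintro ⟨k, hk, rfl, hc⟩
    exact ⟨((k : Int), cs[k]), ⟨⟨k, hk, by simp⟩, by simpa using hc⟩, rfl⟩

lemma occCh_ne_nil (cs : List Char) (c : Char) (h : c ∈ cs) : occCh cs c ≠ [] := by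
  obtain ⟨k, hk, rfl⟩ := List.getElem_of_mem h
  have : ((k : Int)) ∈ occCh cs cs[k] := (mem_occCh _ _ _).2 ⟨k, hk, rfl, rfl⟩
  exact List.ne_nil_of_mem this

lemma mem_slice_iff (cs : List Char) (c : Char) (l r : Int) (hl : 0 ≤ l) (hr : 0 ≤ r) :
    c ∈ PySem.List.slice cs (some (l + 1)) (some r) ↔
      ∃ k : Nat, ∃ hk : k < cs.length, cs[k] = c ∧ l < (k : Int) ∧ (k : Int) < r := by
  rw [PySem.List.slice_toNat cs (by omega : (0:Int) ≤ l + 1) hr]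
  have ha : ((l + 1).toNat : Int) = l + 1 := Int.toNat_of_nonneg (by omega)
  have hb : (r.toNat : Int) = r := Int.toNat_of_nonneg hr
  rw [List.mem_iff_getElem]
  constructor
  · rintro ⟨i, hi, hgi⟩
    rw [List.getElem_take, List.getElem_drop] at hgi
    rw [List.length_take, List.length_drop] at hi
    refine ⟨(l + 1).toNat + i, by omega, hgi, ?_, ?_⟩ <;> push_cast <;> omega
  · rintro ⟨k, hk, hc, hlk, hkr⟩
    have h1 : (l + 1).toNat ≤ k := by omega
    refine ⟨k - (l + 1).toNat, ?_, ?_⟩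
    · rw [List.length_take, List.length_drop]; omega
    · rw [List.getElem_take, List.getElem_drop]
      have : (l + 1).toNat + (k - (l + 1).toNat) = k := by omega
      simp only [this]; exact hc

lemma countP_dedup_mem (u v : List Char) (hsub : ∀ a ∈ u, a ∈ v) :
    (PySem.List.dedup v).countP (fun c => decide (c ∈ u)) = (PySem.Set.ofList u).length := by
  rw [List.countP_eq_length_filter]
  have hperm : ((PySem.List.dedup v).filter (fun c => decide (c ∈ u))).Perm (PySem.Set.ofList u) := by
    rw [List.perm_ext_iff_of_nodup ((PySem.List.nodup_dedup v).filter _) (PySem.Set.nodup_ofList u)]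
    intro a
    simp [List.mem_filter, PySem.Set.mem_ofList]
    exact fun h => hsub a h
  exact hperm.length_eq

lemma term_eq (cs : List Char) (l r : Int) (hl : 0 ≤ l) (hr : 0 ≤ r) :
    ((PySem.Set.ofList (PySem.List.slice cs (some (l + 1)) (some r))).length : Int) =
      (((PySem.List.dedup cs).map (occCh cs)).countP
        (fun py => py.any (fun j => decide (l < j) && decide (j < r))) : Int) := by
  rw [List.countP_map]
  have hcong : ∀ c ∈ PySem.List.dedup cs,
      ((fun py => py.any (fun j => decide (l < j) && decide (j < r))) ∘ occCh cs) c = true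
        ↔ (fun c => decide (c ∈ PySem.List.slice cs (some (l + 1)) (some r))) c = true := by
    intro c _
    simp only [Function.comp_apply, List.any_eq_true, Bool.and_eq_true, decide_eq_true_eq]
    rw [mem_slice_iff cs c l r hl hr]
    constructor
    · rintro ⟨j, hj, hlj, hjr⟩
      obtain ⟨k, hk, rfl, hck⟩ := (mem_occCh cs c j).1 hj
      exact ⟨k, hk, hck, hlj, hjr⟩
    · rintro ⟨k, hk, hck, hlk, hkr⟩
      exact ⟨(k : Int), (mem_occCh cs c _).2 ⟨k, hk, rfl, hck⟩, hlk, hkr⟩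
  rw [List.countP_congr hcong,
    countP_dedup_mem _ cs (fun a ha => PySem.List.mem_of_mem_slice cs _ _ ha)]

lemma main_eq (s : String) : uniquePalindromesBF s = uniquePalindromesBF_alt s := by
  simp only [uniquePalindromesBF, uniquePalindromesBF_alt]
  set cs := s.toList with hcs
  -- A's dict is foldE over enumerate
  have hM : (PySem.List.pyRange 0 (cs.length : Int) 1).foldl (fun M i =>
      let c := PySem.List.pyGetD cs i ' '
      if M.contains c = false then M.insert c (i, i)
      else M.insert c ((M.getD c (0, 0)).1, i)) PySem.Dict.empty
      = foldE (PySem.List.enumerate cs 0) := by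
    unfold foldE
    rw [PySem.List.enumerate_eq_map_pyRange cs ' ', List.foldl_map]
    rfl
  rw [hM]
  have hkeysA : (foldE (PySem.List.enumerate cs 0)).keys = PySem.List.dedup cs := by
    rw [foldE_keys, PySem.List.map_snd_enumerate, PySem.List.dedup_eq_ofList]
  have hitems : (foldE (PySem.List.enumerate cs 0)).items
      = (PySem.List.dedup cs).map (fun c => (c, (foldE (PySem.List.enumerate cs 0)).getD c (0, 0))) := by
    rw [PySem.Dict.items_eq_map_keys _ (foldE_nodup_keys _) (0, 0), hkeysA]
  rw [hitems, List.foldl_map]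
  have hposvals : ((PySem.List.enumerate cs 0).foldl
      (fun d p => d.modify p.2 [] (· ++ [p.1])) PySem.Dict.empty).values
      = (PySem.List.dedup cs).map (occCh cs) := by
    rw [show ((PySem.List.enumerate cs 0).foldl
      (fun d p => d.modify p.2 [] (· ++ [p.1])) PySem.Dict.empty) = posDict cs from rfl]
    rw [PySem.Dict.values_eq_map_keys _ (posDict_nodup_keys cs) [], posDict_keys]
    exact List.map_congr_left (fun c _ => posDict_getD cs c)
  rw [hposvals, List.foldl_map]
  apply PySem.List.foldl_congr_mem
  intro acc c hc
  have hcc : c ∈ cs := (PySem.List.mem_dedup cs c).1 hc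
  have hne := occCh_ne_nil cs c hcc
  rcases ho : occCh cs c with _ | ⟨f0, t0⟩
  · exact absurd ho hne
  have hlast : (f0 :: t0).getLast? = some ((f0 :: t0).getLast (by simp)) :=
    List.getLast?_eq_some_getLast (by simp)
  set t1 := (f0 :: t0).getLast (by simp) with ht1
  have hgetD : (foldE (PySem.List.enumerate cs 0)).getD c (0, 0) = (f0, t1) := by
    rw [PySem.Dict.getD_eq_get?_getD, foldE_get?]
    rw [show occL (PySem.List.enumerate cs 0) c = occCh cs c from rfl, ho, hlast]
    simp
  have hp0 : PySem.List.pyGet? (occCh cs c) 0 = some f0 := by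
    rw [PySem.List.pyGet?_zero, ho]; simp
  have hp1 : PySem.List.pyGet? (occCh cs c) (-1) = some t1 := by
    rw [PySem.List.pyGet?_neg_one, ho, hlast]
  rw [ho] at hp0 hp1
  simp only [hgetD, hp0, hp1]
  by_cases hcond : t1 - f0 ≤ 1
  · simp [hcond]
  · simp only [hcond, if_false]
    rw [PySem.List.foldl_if_add_one]
    -- nonnegativity of the first and last occurrence
    have hf0m : f0 ∈ occCh cs c := by rw [ho]; simp
    have ht1m : t1 ∈ occCh cs c := by
      rw [ho]; exact List.getLast_mem _
    obtain ⟨k1, _, rfl, -⟩ := (mem_occCh cs c f0).1 hf0m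
    obtain ⟨k2, _, hk2, -⟩ := (mem_occCh cs c t1).1 ht1m
    have h0f : (0 : Int) ≤ (k1 : Int) := by positivity
    have h0t : (0 : Int) ≤ t1 := by rw [hk2]; positivity
    rw [term_eq cs _ _ h0f h0t]

-- ===== VERDICT (by name: the statement is the Claim_ definition above) =====
theorem uniquePalindromesBF_spec : Claim_equal_uniquePalindromesBF := by
  intro s _
  unfold Spec_uniquePalindromesBF
  exact main_eq s
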